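-- pv_equiv track=rewrite | github.com/lucinamay/biosynfoni | src/biosynfoni/inoutput.py | entry_parser
-- ===== SOURCE A (Python) =====
-- def entry_parser(lines: list, sep: str = "$$$$") -> list[list]:
--     entries = []
--     current_entry = []
--     for line in lines:
--         current_entry.append(line)
--         if line == sep:
--             entries.append(current_entry)
--             current_entry = []  # new entry
--     return entries
-- ===== SOURCE B (Python) =====
-- def entry_parser(lines: list, sep: str = "$$$$") -> list[list]:
--     positions = [i for i, line in enumerate(lines) if line == sep]
--     entries = []
--     start = 0
--     for pos in positions:
--         entries.append(lines[start:pos + 1])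
--         start = pos + 1
--     return entries
-- ===== Notes on version B (the rewrite author's own statement) =====
-- stated objective: alternative
-- what changed: Instead of accumulating a growing current-entry list line by line, B first collects the indices of separator lines and then emits each entry as one slice between consecutive separators (trailing lines after the last separator are dropped, as in A).
import Mathlib
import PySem

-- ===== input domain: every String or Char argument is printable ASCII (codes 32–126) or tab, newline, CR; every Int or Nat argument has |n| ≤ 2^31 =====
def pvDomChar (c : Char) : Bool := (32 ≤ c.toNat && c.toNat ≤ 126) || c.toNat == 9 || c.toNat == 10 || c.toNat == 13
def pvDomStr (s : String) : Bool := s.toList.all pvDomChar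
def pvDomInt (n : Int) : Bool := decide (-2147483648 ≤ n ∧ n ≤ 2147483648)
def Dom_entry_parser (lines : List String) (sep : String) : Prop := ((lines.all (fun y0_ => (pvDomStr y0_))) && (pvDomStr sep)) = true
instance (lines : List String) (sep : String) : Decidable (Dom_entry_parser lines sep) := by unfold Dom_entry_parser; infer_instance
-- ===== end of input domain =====

-- B replaces A's line-by-line accumulation with a separator-index pass followed by slicing; alternative decomposition, same cost.


-- ===== PORT A =====
def entry_parser (lines : List String) (sep : String) : List (List String) :=
  (lines.foldl
    (fun (st : List (List String) × List String) line =>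
      let current_entry := st.2 ++ [line]
      if line == sep then (st.1 ++ [current_entry], []) else (st.1, current_entry))
    ([], [])).1

-- ===== PORT B =====
def entry_parser_alt (lines : List String) (sep : String) : List (List String) :=
  let positions : List Int :=
    ((PySem.List.enumerate lines).filter (fun p => p.2 == sep)).map (·.1)
  (positions.foldl
    (fun (st : List (List String) × Int) pos =>
      (st.1 ++ [PySem.List.slice lines (some st.2) (some (pos + 1))], pos + 1))
    ([], 0)).1

-- ===== PRECONDITION & SPEC =====
def Spec_entry_parser (lines : List String) (sep : String) (out : List (List String)) : Prop := out = entry_parser_alt lines sep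
instance (lines : List String) (sep : String) (out : List (List String)) : Decidable (Spec_entry_parser lines sep out) := by unfold Spec_entry_parser; infer_instance

-- ===== CLAIM (what is proved, stated in full; the proofs are below) =====
def Claim_equal_entry_parser : Prop := ∀ (lines : List String) (sep : String), Dom_entry_parser lines sep → Spec_entry_parser lines sep (entry_parser lines sep)

-- ===== LEMMAS AND PROOFS =====

/-- Reference recursion: A's loop as structural recursion over the lines. -/
def pvGo (sep : String) (cur : List String) : List String → List (List String)
  | [] => []
  | l :: ls => if l == sep then (cur ++ [l]) :: pvGo sep [] ls else pvGo sep (cur ++ [l]) ls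

theorem pvA_eq_go (sep : String) (ls : List String) :
    ∀ (acc : List (List String)) (cur : List String),
    (ls.foldl
      (fun (st : List (List String) × List String) line =>
        let current_entry := st.2 ++ [line]
        if line == sep then (st.1 ++ [current_entry], []) else (st.1, current_entry))
      (acc, cur)).1 = acc ++ pvGo sep cur ls := by
  induction ls with
  | nil => intro acc cur; simp [pvGo]
  | cons l ls ih =>
    intro acc cur
    simp only [List.foldl_cons, pvGo]
    by_cases h : l == sep
    · simpa [h] using ih (acc ++ [cur ++ [l]]) []
    · simpa [h] using ih acc (cur ++ [l])

/-- separator positions of the suffix, starting index s. -/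
def pvPos (sep : String) (s : Int) : List String → List Int
  | [] => []
  | l :: ls => if l == sep then s :: pvPos sep (s + 1) ls else pvPos sep (s + 1) ls

theorem pvPos_eq (sep : String) (ls : List String) : ∀ (s : Int),
    ((PySem.List.enumerate ls s).filter (fun p => p.2 == sep)).map (·.1) = pvPos sep s ls := by
  induction ls with
  | nil => intro s; simp [PySem.List.enumerate_nil, pvPos]
  | cons l ls ih =>
    intro s
    rw [PySem.List.enumerate_cons]
    by_cases h : l == sep
    · simp [List.filter, h, pvPos, ih]
    · simp [List.filter, h, pvPos, ih]

theorem pvTake_succ_of_drop (L : List String) (start i : Nat) (l : String) (ls : List String)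
    (hle : start ≤ i) (hdrop : L.drop i = l :: ls) :
    (L.drop start).take (i + 1 - start) = (L.drop start).take (i - start) ++ [l] := by
  have hget : (L.drop start)[i - start]? = some l := by
    rw [List.getElem?_drop, show start + (i - start) = i from by omega]
    have h0 : (List.drop i L)[0]? = L[i + 0]? := List.getElem?_drop
    rw [hdrop] at h0
    simpa using h0.symm
  rw [show i + 1 - start = (i - start) + 1 from by omega, List.take_add_one, hget]
  rfl

theorem pvB_inv (L : List String) (sep : String) (ls : List String) :
    ∀ (i start : Nat) (res : List (List String)), start ≤ i → L.drop i = ls →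
    ((pvPos sep (i : Int) ls).foldl
      (fun (st : List (List String) × Int) pos =>
        (st.1 ++ [PySem.List.slice L (some st.2) (some (pos + 1))], pos + 1))
      (res, (start : Int))).1
    = res ++ pvGo sep ((L.drop start).take (i - start)) ls := by
  induction ls with
  | nil => intro i start res _ _; simp [pvPos, pvGo]
  | cons l ls ih =>
    intro i start res hle hdrop
    have hdrop' : L.drop (i + 1) = ls := by
      rw [show i + 1 = i + 1 from rfl, ← List.drop_drop, hdrop]
      rfl
    have htake := pvTake_succ_of_drop L start i l ls hle hdrop
    have hcast : ((i : Int) + 1) = ((i + 1 : Nat) : Int) := by push_cast; ring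
    by_cases h : l == sep
    · have hp : pvPos sep (i : Int) (l :: ls) = (i : Int) :: pvPos sep ((i : Int) + 1) ls := by
        simp [pvPos, h]
      have hslice : PySem.List.slice L (some (start : Int)) (some ((i : Int) + 1))
          = (L.drop start).take (i + 1 - start) := by
        rw [PySem.List.slice_toNat L (Int.natCast_nonneg start) (by positivity)]
        congr 1
      rw [hp]
      simp only [List.foldl_cons]
      rw [hslice, htake, hcast, ih (i + 1) (i + 1)
        (res ++ [(L.drop start).take (i - start) ++ [l]]) le_rfl hdrop']
      simp [pvGo, h]
    · have hp : pvPos sep (i : Int) (l :: ls) = pvPos sep ((i : Int) + 1) ls := by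
        simp [pvPos, h]
      rw [hp, hcast, ih (i + 1) start res (by omega) hdrop']
      rw [htake]
      simp [pvGo, h]

-- ===== VERDICT (by name: the statement is the Claim_ definition above) =====
theorem entry_parser_spec : Claim_equal_entry_parser := by
  intro lines sep _
  unfold Spec_entry_parser entry_parser entry_parser_alt
  rw [pvA_eq_go, pvPos_eq]
  have := pvB_inv lines sep lines 0 0 [] (le_refl 0) (by simp)
  simpa using this.symm
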